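-- pv_equiv track=rewrite | github.com/FirebirdSQL/firebird-qa | firebird/qa/fbtconv.py | multiline_comment
-- ===== SOURCE A (Python) =====
-- def multiline_comment(text: str, indent=15) -> str:
--     result = []
--     first = True
--     for line in text.splitlines():
--         if first:
--             result.append(line)
--             first = False
--         else:
--             result.append(f"#{' ' * indent}{line}")
--     return '\n'.join(result)
-- ===== SOURCE B (Python) =====
-- def multiline_comment(text: str, indent=15) -> str:
--     out = []
--     sep = None  # built once, on first use (so a huge indent costs nothing when never needed)
--     i, n = 0, len(text)
--     while i < n:
--         c = text[i]
--         if c == '\r' or c == '\n':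
--             i += 2 if c == '\r' and i + 1 < n and text[i + 1] == '\n' else 1
--             if i < n:
--                 if sep is None:
--                     sep = '\n#' + ' ' * indent
--                 out.append(sep)
--         else:
--             out.append(c)
--             i += 1
--     return ''.join(out)
-- ===== Notes on version B (the rewrite author's own statement) =====
-- stated objective: alternative
-- what changed: Replaces A's splitlines-into-list, first-flag loop with per-line formatting and newline-join by a single character-level scan over the string that copies ordinary characters and, at each non-trailing line terminator (LF, CR or CRLF), emits a newline, the comment marker and the indent spaces, never materialising a line list.
import Mathlib
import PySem

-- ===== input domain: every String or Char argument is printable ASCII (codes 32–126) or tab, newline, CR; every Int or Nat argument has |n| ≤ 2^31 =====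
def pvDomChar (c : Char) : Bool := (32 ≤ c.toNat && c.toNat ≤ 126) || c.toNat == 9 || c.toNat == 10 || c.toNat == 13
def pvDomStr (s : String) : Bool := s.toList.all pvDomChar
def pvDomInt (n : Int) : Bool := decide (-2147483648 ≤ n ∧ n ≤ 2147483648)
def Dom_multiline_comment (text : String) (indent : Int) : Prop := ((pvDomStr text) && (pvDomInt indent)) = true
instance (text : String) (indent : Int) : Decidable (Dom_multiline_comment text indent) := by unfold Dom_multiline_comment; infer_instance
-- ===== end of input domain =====

-- B replaces A's splitlines/flag-loop/join pipeline by a single character-level scan that copies characters and emits a newline, the comment marker and the indent spaces at each non-trailing line terminator (alternative decomposition, same cost).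


-- ===== PORT A =====
-- loop over splitlines with a `first` flag, accumulating formatted lines, then '\n'.join
-- (' ' * indent on a negative indent is '' in Python; List.replicate indent.toNat ' ' is exact)
def multiline_comment (text : String) (indent : Int) : String :=
  let step := fun (st : List (List Char) × Bool) (line : List Char) =>
    if st.2 then (st.1 ++ [line], false)
    else (st.1 ++ [('#' :: List.replicate indent.toNat ' ') ++ line], st.2)
  let res := (PySem.Chars.splitlines text.toList).foldl step ([], true)
  String.ofList (PySem.Chars.join ['\n'] res.1)

-- ===== PORT B =====
-- Source B's while-loop over the index i, ported as structural recursion on the remaining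
-- characters: a '\r\n', '\r' or '\n' terminator emits sep unless it ends the string
-- (rest = [] is Source B's 'i < n' test after the advance); any other character is copied
def pvScan (sep : List Char) : List Char → List Char
  | [] => []
  | '\r' :: '\n' :: rest => (if rest = [] then [] else sep) ++ pvScan sep rest
  | c :: rest =>
    if c = '\n' ∨ c = '\r' then (if rest = [] then [] else sep) ++ pvScan sep rest
    else c :: pvScan sep rest

def multiline_comment_alt (text : String) (indent : Int) : String :=
  let sep := '\n' :: '#' :: List.replicate indent.toNat ' '
  String.ofList (pvScan sep text.toList)

-- ===== PRECONDITION & SPEC =====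
def Spec_multiline_comment (text : String) (indent : Int) (out : String) : Prop := out = multiline_comment_alt text indent
instance (text : String) (indent : Int) (out : String) : Decidable (Spec_multiline_comment text indent out) := by unfold Spec_multiline_comment; infer_instance

-- ===== CLAIM (what is proved, stated in full; the proofs are below) =====
def Claim_equal_multiline_comment : Prop := ∀ (text : String) (indent : Int), Dom_multiline_comment text indent → Spec_multiline_comment text indent (multiline_comment text indent)

-- ===== LEMMAS AND PROOFS =====

-- one-step equations for PySem.Chars.splitlines.go
theorem pv_go_nil (isB : Char → Bool) (cur : List Char) (acc : List (List Char)) :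
    PySem.Chars.splitlines.go isB [] cur acc
      = if cur.isEmpty then acc.reverse else (cur.reverse :: acc).reverse := by
  rw [PySem.Chars.splitlines.go.eq_def]

theorem pv_go_rn (isB : Char → Bool) (rest cur : List Char) (acc : List (List Char)) :
    PySem.Chars.splitlines.go isB ('\r' :: '\n' :: rest) cur acc
      = PySem.Chars.splitlines.go isB rest [] (cur.reverse :: acc) := by
  rw [PySem.Chars.splitlines.go.eq_def]
  rfl

theorem pv_go_cons (isB : Char → Bool) (c : Char) (rest cur : List Char) (acc : List (List Char))
    (hne : ¬ (c = '\r' ∧ ∃ r, rest = '\n' :: r)) :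
    PySem.Chars.splitlines.go isB (c :: rest) cur acc
      = if isB c then PySem.Chars.splitlines.go isB rest [] (cur.reverse :: acc)
        else PySem.Chars.splitlines.go isB rest (c :: cur) acc := by
  rw [PySem.Chars.splitlines.go.eq_def]
  split
  · rename_i h; cases h
  · rename_i r heq; injection heq with h1 h2; exact absurd ⟨h1, r, h2⟩ hne
  · rename_i h; cases h; rfl

theorem pv_hne {c : Char} {rest : List Char} (h : ∀ r : List Char, c = '\r' → rest = '\n' :: r → False) :
    ¬ (c = '\r' ∧ ∃ r, rest = '\n' :: r) := fun ⟨h1, r, h2⟩ => h r h1 h2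

-- the accumulator of splitlines.go is a reversed prefix of the result
theorem pv_go_acc (isB : Char → Bool) (l cur : List Char) (acc : List (List Char)) :
    ∀ a : List (List Char), PySem.Chars.splitlines.go isB l cur a
      = a.reverse ++ PySem.Chars.splitlines.go isB l cur [] := by
  induction l, cur, acc using PySem.Chars.splitlines.go.induct isB with
  | case1 cur acc hcur => intro a; simp [pv_go_nil, hcur]
  | case2 cur acc hcur => intro a; simp [pv_go_nil, hcur]
  | case3 rest cur acc ih =>
    intro a
    rw [pv_go_rn, pv_go_rn, ih (cur.reverse :: a), ih [cur.reverse]]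
    simp
  | case4 c rest cur acc hne hB ih =>
    intro a
    rw [pv_go_cons isB c rest cur a (pv_hne hne), pv_go_cons isB c rest cur [] (pv_hne hne)]
    simp only [hB, if_true]
    rw [ih (cur.reverse :: a), ih [cur.reverse]]
    simp
  | case5 c rest cur acc hne hB ih =>
    intro a
    rw [pv_go_cons isB c rest cur a (pv_hne hne), pv_go_cons isB c rest cur [] (pv_hne hne)]
    simp only [hB, if_false, Bool.false_eq_true]
    exact ih a

theorem pv_go_ne_nil (isB : Char → Bool) (l cur : List Char) (acc : List (List Char)) :
    l ≠ [] → PySem.Chars.splitlines.go isB l cur [] ≠ [] := by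
  induction l, cur, acc using PySem.Chars.splitlines.go.induct isB with
  | case1 cur acc hcur => intro h; exact absurd rfl h
  | case2 cur acc hcur => intro h; exact absurd rfl h
  | case3 rest cur acc ih =>
    intro _
    rw [pv_go_rn, pv_go_acc isB rest [] [] [cur.reverse]]
    simp
  | case4 c rest cur acc hne hB ih =>
    intro _
    rw [pv_go_cons isB c rest cur [] (pv_hne hne)]
    simp only [hB, if_true]
    rw [pv_go_acc isB rest [] [] [cur.reverse]]
    simp
  | case5 c rest cur acc hne hB ih =>
    intro _
    rw [pv_go_cons isB c rest cur [] (pv_hne hne)]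
    simp only [hB, if_false, Bool.false_eq_true]
    cases hr : rest with
    | nil => rw [pv_go_nil]; simp
    | cons x xs => exact hr ▸ ih (by simp [hr])

-- a nonempty current line is prepended to the head of the remaining split
theorem pv_go_cur (isB : Char → Bool) (l cur0 : List Char) (acc0 : List (List Char)) :
    ∀ cur : List Char, cur ≠ [] →
      PySem.Chars.splitlines.go isB l cur []
        = match PySem.Chars.splitlines.go isB l [] [] with
          | [] => [cur.reverse]
          | h :: t => (cur.reverse ++ h) :: t := by
  induction l, cur0, acc0 using PySem.Chars.splitlines.go.induct isB with
  | case1 cur0 acc0 hcur => intro cur hc; rw [pv_go_nil, pv_go_nil]; simp [List.isEmpty_iff, hc]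
  | case2 cur0 acc0 hcur => intro cur hc; rw [pv_go_nil, pv_go_nil]; simp [List.isEmpty_iff, hc]
  | case3 rest cur0 acc0 ih =>
    intro cur hc
    rw [pv_go_rn, pv_go_rn, pv_go_acc isB rest [] [] [cur.reverse], pv_go_acc isB rest [] [] [List.reverse []]]
    cases PySem.Chars.splitlines.go isB rest [] [] <;> simp
  | case4 c rest cur0 acc0 hne hB ih =>
    intro cur hc
    rw [pv_go_cons isB c rest cur [] (pv_hne hne), pv_go_cons isB c rest [] [] (pv_hne hne)]
    simp only [hB, if_true]
    rw [pv_go_acc isB rest [] [] [cur.reverse], pv_go_acc isB rest [] [] [List.reverse []]]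
    cases PySem.Chars.splitlines.go isB rest [] [] <;> simp
  | case5 c rest cur0 acc0 hne hB ih =>
    intro cur hc
    rw [pv_go_cons isB c rest cur [] (pv_hne hne), pv_go_cons isB c rest [] [] (pv_hne hne)]
    simp only [hB, if_false, Bool.false_eq_true]
    rw [ih (c :: cur) (by simp), ih [c] (by simp)]
    cases PySem.Chars.splitlines.go isB rest [] [] <;> simp

-- the line-break test PySem.Chars.splitlines uses, named so lemmas can mention it
def pvIsB (c : Char) : Bool :=
  decide (c.toNat = 10) || decide (c.toNat = 13) || decide (c.toNat = 11) || decide (c.toNat = 12) ||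
    decide (c.toNat = 28) || decide (c.toNat = 29) || decide (c.toNat = 30) || decide (c.toNat = 133) ||
    decide (c.toNat = 8232) || decide (c.toNat = 8233)

theorem pv_splitlines_eq (l : List Char) :
    PySem.Chars.splitlines l = PySem.Chars.splitlines.go pvIsB l [] [] := rfl

theorem pv_char_eq_of_toNat {c : Char} {n : Nat} (d : Char) (hd : d.toNat = n) (h : c.toNat = n) : c = d := by
  apply Char.ext
  apply UInt32.toNat_inj.mp
  show c.toNat = d.toNat
  omega

-- on Dom characters the only line breaks are '\n' and '\r'
theorem pv_isB_of_dom (c : Char) (h : pvDomChar c = true) : pvIsB c = decide (c = '\n' ∨ c = '\r') := by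
  by_cases h10 : c.toNat = 10
  · have : c = '\n' := pv_char_eq_of_toNat _ (by decide) h10
    subst this; decide
  by_cases h13 : c.toNat = 13
  · have : c = '\r' := pv_char_eq_of_toNat _ (by decide) h13
    subst this; decide
  have hn : c ≠ '\n' := fun e => h10 (by subst e; decide)
  have hr : c ≠ '\r' := fun e => h13 (by subst e; decide)
  simp only [pvDomChar, Bool.or_eq_true, Bool.and_eq_true, decide_eq_true_eq, beq_iff_eq] at h
  rw [decide_eq_false (by tauto : ¬ (c = '\n' ∨ c = '\r'))]
  simp only [pvIsB, Bool.or_eq_false_iff, decide_eq_false_iff_not]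
  omega

theorem pv_join_cons (sep c : List Char) (h : List Char) (t : List (List Char)) :
    PySem.Chars.join sep ((c ++ h) :: t) = c ++ PySem.Chars.join sep (h :: t) := by
  cases t with
  | nil => simp [PySem.Chars.join_singleton]
  | cons b r => simp [PySem.Chars.join_cons_cons]

-- a consumed terminator: the scan's "sep unless at the end" piece = joining with an extra empty line in front
theorem pv_break_step (sep rest : List Char)
    (ih : pvScan sep rest = (match PySem.Chars.splitlines.go pvIsB rest [] [] with
      | [] => []
      | h :: t => PySem.Chars.join sep (h :: t))) :
    (if rest = [] then [] else sep) ++ pvScan sep rest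
      = PySem.Chars.join sep ([] :: PySem.Chars.splitlines.go pvIsB rest [] []) := by
  by_cases hr : rest = []
  · subst hr
    rw [pv_go_nil]
    simp [PySem.Chars.join_singleton, pvScan]
  · have hnn := pv_go_ne_nil pvIsB rest [] [] hr
    cases hS : PySem.Chars.splitlines.go pvIsB rest [] [] with
    | nil => exact absurd hS hnn
    | cons h t =>
      rw [hS] at ih
      rw [if_neg hr, ih]
      simp [PySem.Chars.join_cons_cons]

-- the character scan equals joining the split lines with sep (on Dom characters)
theorem pv_scan_eq (sep : List Char) (l : List Char) (hd : ∀ c ∈ l, pvDomChar c = true) :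
    pvScan sep l = (match PySem.Chars.splitlines.go pvIsB l [] [] with
      | [] => []
      | h :: t => PySem.Chars.join sep (h :: t)) := by
  fun_induction pvScan sep l with
  | case1 => rfl
  | case2 rest ih =>
    rw [pv_go_rn, pv_go_acc pvIsB rest [] [] [List.reverse []]]
    simp only [List.reverse_cons, List.reverse_nil, List.nil_append, List.singleton_append]
    exact pv_break_step sep rest (ih (fun d hdm => hd d (by simp [hdm])))
  | case3 c rest hne hif ih =>
    have hB : pvIsB c = true := by
      rw [pv_isB_of_dom c (hd c (by simp))]; exact decide_eq_true hif
    rw [pv_go_cons pvIsB c rest [] [] (pv_hne fun r h1 h2 => hne r h1 h2), if_pos hB,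
      pv_go_acc pvIsB rest [] [] [List.reverse []]]
    simp only [List.reverse_cons, List.reverse_nil, List.nil_append, List.singleton_append]
    exact pv_break_step sep rest (ih (fun d hdm => hd d (by simp [hdm])))
  | case4 c rest hne hif ih =>
    have hB : pvIsB c = false := by
      rw [pv_isB_of_dom c (hd c (by simp))]; exact decide_eq_false hif
    rw [pv_go_cons pvIsB c rest [] [] (pv_hne fun r h1 h2 => hne r h1 h2), if_neg (by simp [hB]),
      pv_go_cur pvIsB rest [] [] [c] (by simp),
      ih (fun d hdm => hd d (by simp [hdm]))]
    cases hS : PySem.Chars.splitlines.go pvIsB rest [] [] with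
    | nil => simp [PySem.Chars.join_singleton]
    | cons h t =>
      simp only [List.reverse_cons, List.reverse_nil, List.nil_append]
      rw [pv_join_cons sep [c] h t]
      rfl

-- A's loop after the first line: every remaining line gets the prefix appended to the accumulator.
theorem pv_fold_false (p : List Char) (t : List (List Char)) (acc : List (List Char)) :
    t.foldl (fun (st : List (List Char) × Bool) line =>
      if st.2 then (st.1 ++ [line], false)
      else (st.1 ++ [('#' :: p) ++ line], st.2)) (acc, false)
    = (acc ++ t.map (fun line => ('#' :: p) ++ line), false) := by
  induction t generalizing acc with
  | nil => simp
  | cons x r ih =>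
    simp only [List.foldl_cons, Bool.false_eq_true, if_false]
    rw [ih]
    simp

-- joining the prefixed tail with '\n' equals joining the raw tail with the compound separator
theorem pv_join_prefixed (p q : List Char) (t : List (List Char)) :
    PySem.Chars.join ['\n'] ((p ++ q) :: t.map (fun line => p ++ line))
    = p ++ PySem.Chars.join ('\n' :: p) (q :: t) := by
  induction t generalizing q with
  | nil => simp [PySem.Chars.join_singleton]
  | cons x r ih =>
    simp only [List.map_cons, PySem.Chars.join_cons_cons, ih x]
    simp

theorem pv_join_head (p h : List Char) (t : List (List Char)) :
    PySem.Chars.join ['\n'] (h :: t.map (fun line => p ++ line))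
    = PySem.Chars.join ('\n' :: p) (h :: t) := by
  cases t with
  | nil => simp [PySem.Chars.join_singleton]
  | cons q r =>
    simp only [List.map_cons, PySem.Chars.join_cons_cons]
    calc h ++ ['\n'] ++ PySem.Chars.join ['\n'] ((p ++ q) :: List.map (fun line => p ++ line) r)
        = h ++ ['\n'] ++ (p ++ PySem.Chars.join ('\n' :: p) (q :: r)) := by rw [pv_join_prefixed]
      _ = h ++ ('\n' :: p) ++ PySem.Chars.join ('\n' :: p) (q :: r) := by simp

-- ===== VERDICT (by name: the statement is the Claim_ definition above) =====
theorem multiline_comment_spec : Claim_equal_multiline_comment := by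
  intro text indent hdom
  have hchars : ∀ c ∈ text.toList, pvDomChar c = true := by
    unfold Dom_multiline_comment pvDomStr at hdom
    simp only [Bool.and_eq_true, List.all_eq_true] at hdom
    exact fun c hc => hdom.1 c hc
  unfold Spec_multiline_comment multiline_comment multiline_comment_alt
  dsimp only
  rw [pv_scan_eq _ _ hchars, ← pv_splitlines_eq]
  cases hls : PySem.Chars.splitlines text.toList with
  | nil => simp [PySem.Chars.join_nil]
  | cons h t =>
    simp only [List.foldl_cons, List.nil_append, reduceIte]
    rw [pv_fold_false (List.replicate indent.toNat ' ') t [h]]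
    simp only [List.singleton_append]
    rw [pv_join_head (('#' :: List.replicate indent.toNat ' ')) h t]
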